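-- pv_equiv track=rewrite | github.com/Vehicom0607/wordHunter | Algos.py | by_biggest
-- ===== SOURCE A (Python) =====
-- def by_biggest(word_dict):
--     ordered_word_list = []
--
--     # Find the length of the biggest word
--     biggest_len = 0
--     for key in word_dict:
--         biggest_len = max(key, biggest_len)
--
--     while biggest_len >= 3:
--         if biggest_len not in word_dict: # If there are no words of such length
--             biggest_len -= 1
--             continue
--
--         for word in word_dict[biggest_len]:
--             ordered_word_list.append(word)
--         biggest_len -= 1
--
--     # Returns in the format [] of [coords, word_string]
--     # coords is a [] of (x, y)s
--     # word_string is the word in string form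
--     return ordered_word_list
-- ===== SOURCE B (Python) =====
-- def by_biggest(word_dict):
--     ordered_word_list = []
--     for length in sorted(word_dict, reverse=True):
--         if length >= 3:
--             ordered_word_list.extend(word_dict[length])
--     return ordered_word_list
-- ===== Notes on version B (the rewrite author's own statement) =====
-- stated objective: simpler
-- what changed: Instead of computing the max key and counting an integer down from it to 3 while skipping absent lengths, B sorts the dict's existing keys in descending order once and concatenates the word lists of the keys >= 3.
import Mathlib
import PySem

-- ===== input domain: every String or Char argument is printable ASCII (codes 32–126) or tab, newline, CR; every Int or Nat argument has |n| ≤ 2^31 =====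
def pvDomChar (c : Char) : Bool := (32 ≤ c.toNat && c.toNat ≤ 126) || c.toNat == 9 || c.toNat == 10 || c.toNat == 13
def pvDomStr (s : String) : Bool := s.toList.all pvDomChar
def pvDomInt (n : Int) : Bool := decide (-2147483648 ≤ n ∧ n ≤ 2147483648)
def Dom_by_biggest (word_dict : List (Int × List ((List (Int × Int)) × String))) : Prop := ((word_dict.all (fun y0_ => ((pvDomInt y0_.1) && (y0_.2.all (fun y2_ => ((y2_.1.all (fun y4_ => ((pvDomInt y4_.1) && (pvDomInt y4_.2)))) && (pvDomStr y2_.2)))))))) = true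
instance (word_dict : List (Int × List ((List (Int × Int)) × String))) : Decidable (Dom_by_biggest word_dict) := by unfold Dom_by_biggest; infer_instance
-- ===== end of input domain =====

-- B replaces A's max-key search plus countdown-with-skip over every integer from the max to 3
-- by sorting the dict's existing keys descending and concatenating the word lists of keys >= 3 (simpler).


-- ===== PORT A =====
-- the 'while biggest_len >= 3' loop of A (acc = ordered_word_list)
def pvLoopA (d : PySem.Dict Int (List ((List (Int × Int)) × String))) (n : Int)
    (acc : List ((List (Int × Int)) × String)) : List ((List (Int × Int)) × String) :=
  if 3 ≤ n then
    match d.get? n with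
    | none => pvLoopA d (n - 1) acc            -- 'biggest_len not in word_dict': skip
    | some ws => pvLoopA d (n - 1) (acc ++ ws) -- append every word of word_dict[biggest_len]
  else acc
termination_by (n - 2).toNat
decreasing_by all_goals omega

def by_biggest (word_dict : List (Int × List ((List (Int × Int)) × String))) : List ((List (Int × Int)) × String) :=
  let d := PySem.Dict.ofList word_dict
  let biggest_len := d.keys.foldl (fun m key => max key m) 0
  pvLoopA d biggest_len []

-- ===== PORT B =====
def by_biggest_alt (word_dict : List (Int × List ((List (Int × Int)) × String))) : List ((List (Int × Int)) × String) :=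
  let d := PySem.Dict.ofList word_dict
  (PySem.List.sorted d.keys (fun k => k) true).foldl
    (fun acc length => if 3 ≤ length then acc ++ d.getD length [] else acc) []

-- ===== PRECONDITION & SPEC =====
def Spec_by_biggest (word_dict : List (Int × List ((List (Int × Int)) × String))) (out : List ((List (Int × Int)) × String)) : Prop := out = by_biggest_alt word_dict
instance (word_dict : List (Int × List ((List (Int × Int)) × String))) (out : List ((List (Int × Int)) × String)) : Decidable (Spec_by_biggest word_dict out) := by unfold Spec_by_biggest; infer_instance

-- ===== CLAIM (what is proved, stated in full; the proofs are below) =====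
def Claim_equal_by_biggest : Prop := ∀ (word_dict : List (Int × List ((List (Int × Int)) × String))), Dom_by_biggest word_dict → Spec_by_biggest word_dict (by_biggest word_dict)

-- ===== LEMMAS AND PROOFS =====

-- A's countdown loop collects, over the descending range [n, n-1, …, 3], the lists of the present keys
theorem pvLoopA_eq (d : PySem.Dict Int (List ((List (Int × Int)) × String))) (n : Int)
    (acc : List ((List (Int × Int)) × String)) :
    pvLoopA d n acc =
      acc ++ ((PySem.List.pyRange n 2 (-1)).filter (fun k => d.contains k)).flatMap
        (fun k => d.getD k []) := by
  induction n, acc using pvLoopA.induct d with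
  | case1 n acc h hget ih =>
    rw [pvLoopA]
    simp only [if_pos h, hget, ih]
    rw [PySem.List.pyRange_neg_one_cons (by omega : (2:Int) < n)]
    have hc : d.contains n = false := by
      rw [PySem.Dict.contains_eq_isSome_get?, hget]; rfl
    simp [hc]
  | case2 n acc h ws hget ih =>
    rw [pvLoopA]
    simp only [if_pos h, hget, ih]
    rw [PySem.List.pyRange_neg_one_cons (by omega : (2:Int) < n)]
    have hc : d.contains n = true := by
      rw [PySem.Dict.contains_eq_isSome_get?, hget]; rfl
    simp [hc, PySem.Dict.getD_of_get?_eq_some d [] hget, List.append_assoc]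
  | case3 n acc h =>
    rw [pvLoopA]
    simp only [if_neg h]
    rw [PySem.List.pyRange_neg_one_eq_nil (by omega : n ≤ 2)]
    simp

-- B's extend loop is a flatMap over the filtered key list
theorem foldl_extend_if {α : Type} (p : Int → Prop) [DecidablePred p] (f : Int → List α)
    (l : List Int) (acc : List α) :
    l.foldl (fun acc k => if p k then acc ++ f k else acc) acc
      = acc ++ (l.filter (fun k => decide (p k))).flatMap f := by
  induction l generalizing acc with
  | nil => simp
  | cons x xs ih =>
    by_cases h : p x <;> simp [List.foldl_cons, h, ih, List.append_assoc]

-- every key is bounded by A's running maximum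
theorem mem_le_foldl_max (t : List Int) (a : Int) : ∀ y ∈ t, y ≤ t.foldl (fun m key => max key m) a := by
  have hfun : (fun (m key : Int) => max key m) = (fun (m key : Int) => max m key) := by
    funext m k; exact max_comm k m
  rw [hfun]
  exact (PySem.List.le_foldl_max t a).2

-- the two traversal orders visit the same keys in the same (strictly descending) order
theorem key_lists_eq (d : PySem.Dict Int (List ((List (Int × Int)) × String))) (n : Int)
    (hnd : d.keys.Nodup) (hmax : ∀ k ∈ d.keys, k ≤ n) :
    (PySem.List.pyRange n 2 (-1)).filter (fun k => d.contains k)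
      = (PySem.List.sorted d.keys (fun k => k) true).filter (fun k => decide (3 ≤ k)) := by
  have hmemL : ∀ x, x ∈ (PySem.List.pyRange n 2 (-1)).filter (fun k => d.contains k) ↔
      (x ∈ d.keys ∧ 3 ≤ x) := by
    intro x
    simp only [List.mem_filter, PySem.List.mem_pyRange_neg_one]
    constructor
    · rintro ⟨⟨h2, _⟩, hc⟩
      exact ⟨(PySem.Dict.contains_iff_mem_keys d x).1 hc, by omega⟩
    · rintro ⟨hm, h3⟩
      exact ⟨⟨by omega, hmax x hm⟩, (PySem.Dict.contains_iff_mem_keys d x).2 hm⟩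
  have hmemR : ∀ x, x ∈ (PySem.List.sorted d.keys (fun k => k) true).filter (fun k => decide (3 ≤ k)) ↔
      (x ∈ d.keys ∧ 3 ≤ x) := by
    intro x
    simp [List.mem_filter, PySem.List.mem_sorted]
  -- both lists are strictly descending
  have hpL : ((PySem.List.pyRange n 2 (-1)).filter (fun k => d.contains k)).Pairwise (· > ·) := by
    refine List.Pairwise.filter _ ?_
    rw [PySem.List.pyRange_neg_one_eq_reverse]
    rw [List.pairwise_reverse]
    exact PySem.List.pairwise_lt_pyRange_one 3 (n + 1)
  have hndS : (PySem.List.sorted d.keys (fun k => k) true).Nodup :=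
    (PySem.List.sorted_perm d.keys (fun k => k) true).nodup_iff.2 hnd
  have hpR : ((PySem.List.sorted d.keys (fun k => k) true).filter (fun k => decide (3 ≤ k))).Pairwise (· > ·) := by
    refine List.Pairwise.filter _ ?_
    have h1 := PySem.List.sorted_pairwise_rev d.keys (fun k => k)
    have h2 : (PySem.List.sorted d.keys (fun k => k) true).Pairwise (· ≠ ·) := hndS
    exact (h1.and h2).imp (fun {a b} h => lt_of_le_of_ne h.1 (Ne.symm h.2))
  -- strictly descending + same membership ⇒ equal
  have hperm := (List.perm_ext_iff_of_nodup (hpL.imp (fun {a b} h => ne_of_gt h))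
    (hpR.imp (fun {a b} h => ne_of_gt h))).2 (fun x => (hmemL x).trans ((hmemR x).symm))
  exact hperm.eq_of_pairwise (fun a b _ _ h1 h2 => absurd h1 (by omega)) hpL hpR

-- ===== VERDICT (by name: the statement is the Claim_ definition above) =====
theorem by_biggest_spec : Claim_equal_by_biggest := by
  intro word_dict _
  unfold Spec_by_biggest
  show by_biggest word_dict = by_biggest_alt word_dict
  simp only [by_biggest, by_biggest_alt]
  rw [pvLoopA_eq, foldl_extend_if (fun k => (3:Int) ≤ k)]
  rw [key_lists_eq _ _ (PySem.Dict.nodup_keys_ofList word_dict)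
    (mem_le_foldl_max (PySem.Dict.ofList word_dict).keys 0)]
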